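-- pv_equiv track=rewrite | github.com/sahilposa/Homeworks-SE | hw3.py | countVAndC
-- ===== SOURCE A (Python) =====
-- def countVAndC(string):
--     countvowels=0
--     countcons=0
--     vowels=set("aeiou")
--     for letter in string:
--         if letter in vowels:
--             countvowels+=1 #increments on counted vowels
--         else:
--             countcons+=1 #increments on not vowels
--     if countvowels > countcons:
--         return True
--     elif countcons > countvowels:
--         return False
--     else:
--         return None
-- ===== SOURCE B (Python) =====
-- def countVAndC(string):
--     # Build a character-frequency histogram, then query the five vowels
--     # and decide by comparing twice the vowel total with the length.
--     freq = {}
--     for letter in string: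
--         freq[letter] = freq.get(letter, 0) + 1
--     countvowels = 0
--     for v in "aeiou":
--         countvowels += freq.get(v, 0)
--     n = len(string)
--     if 2 * countvowels > n:
--         return True
--     if 2 * countvowels < n:
--         return False
--     return None
-- ===== Notes on version B (the rewrite author's own statement) =====
-- stated objective: alternative
-- what changed: B builds a character-frequency dictionary in one pass, obtains the vowel total by five dictionary lookups (one per vowel), and decides by comparing 2*countvowels with len(string), instead of A's per-character if/else with two parallel counters.
import Mathlib
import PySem

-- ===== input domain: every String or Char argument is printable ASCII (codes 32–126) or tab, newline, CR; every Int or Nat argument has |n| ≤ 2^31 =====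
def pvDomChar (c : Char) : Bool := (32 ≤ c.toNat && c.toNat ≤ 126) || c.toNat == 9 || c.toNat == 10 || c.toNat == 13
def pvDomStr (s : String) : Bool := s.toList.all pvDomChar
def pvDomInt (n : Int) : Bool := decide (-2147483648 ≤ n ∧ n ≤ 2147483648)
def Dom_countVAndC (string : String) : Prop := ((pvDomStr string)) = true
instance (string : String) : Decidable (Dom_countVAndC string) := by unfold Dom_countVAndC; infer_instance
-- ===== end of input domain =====

-- B builds a character-frequency dictionary, sums the five vowel entries and compares 2*countvowels with the length (alternative data structure; A keeps two in-loop counters).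

-- ===== PORT A =====
def countVAndC (string : String) : Option Bool :=
  let vowels : PySem.Set Char := PySem.Set.ofList "aeiou".toList
  let counts : Int × Int :=
    string.toList.foldl
      (fun (p : Int × Int) letter =>
        if letter ∈ vowels then (p.1 + 1, p.2) else (p.1, p.2 + 1))
      (0, 0)
  if counts.1 > counts.2 then some true
  else if counts.2 > counts.1 then some false
  else none

-- ===== PORT B =====
def countVAndC_alt (string : String) : Option Bool :=
  let freq : PySem.Dict Char Int :=
    string.toList.foldl (fun d letter => d.insert letter (d.getD letter 0 + 1)) PySem.Dict.empty
  let countvowels : Int :=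
    "aeiou".toList.foldl (fun acc v => acc + freq.getD v 0) 0
  let n : Int := (string.toList.length : Int)
  if 2 * countvowels > n then some true
  else if 2 * countvowels < n then some false
  else none

-- ===== PRECONDITION & SPEC =====
def Spec_countVAndC (string : String) (out : Option Bool) : Prop := out = countVAndC_alt string
instance (string : String) (out : Option Bool) : Decidable (Spec_countVAndC string out) := by unfold Spec_countVAndC; infer_instance

-- ===== CLAIM =====
def Claim_equal_countVAndC : Prop := ∀ (string : String), Dom_countVAndC string → Spec_countVAndC string (countVAndC string)

-- ===== LEMMAS AND PROOFS =====

-- A's two-counter fold expressed through the vowel countP and the length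
theorem pv_pair_fold (l : List Char) (cv cc : Int) :
    l.foldl
      (fun (p : Int × Int) letter =>
        if letter ∈ (PySem.Set.ofList "aeiou".toList : PySem.Set Char) then (p.1 + 1, p.2) else (p.1, p.2 + 1))
      (cv, cc)
    = (cv + (l.countP (· ∈ "aeiou".toList) : Int),
       cc + ((l.length : Int) - (l.countP (· ∈ "aeiou".toList) : Int))) := by
  induction l generalizing cv cc with
  | nil => simp
  | cons h t ih =>
    have hmem : (h ∈ (PySem.Set.ofList "aeiou".toList : PySem.Set Char)) ↔ (h ∈ "aeiou".toList) :=
      PySem.Set.mem_ofList _ _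
    rw [List.foldl_cons, List.countP_cons]
    by_cases hv : h ∈ "aeiou".toList
    · rw [if_pos (hmem.mpr hv), if_pos (by simpa using hv), ih]
      simp only [List.length_cons]
      push_cast
      exact Prod.ext (by ring) (by ring)
    · rw [if_neg (fun hx => hv (hmem.mp hx)), if_neg (by simpa using hv), ih]
      simp only [List.length_cons]
      push_cast
      exact Prod.ext (by ring) (by ring)

-- per-character indicator: summing 'is this char equal to v' over the five vowels
theorem pv_indicator (h : Char) :
    ((if h = 'a' then (1:Int) else 0) + (if h = 'e' then 1 else 0) + (if h = 'i' then 1 else 0)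
     + (if h = 'o' then 1 else 0) + (if h = 'u' then 1 else 0))
    = (if h ∈ "aeiou".toList then 1 else 0) := by
  by_cases ha : h = 'a' <;> by_cases he : h = 'e' <;> by_cases hi : h = 'i'
    <;> by_cases ho : h = 'o' <;> by_cases hu : h = 'u' <;> simp_all

-- the five vowel counts sum to the vowel countP
theorem pv_count_sum (l : List Char) :
    ((l.count 'a' : Int) + (l.count 'e' : Int) + (l.count 'i' : Int)
     + (l.count 'o' : Int) + (l.count 'u' : Int))
    = (l.countP (· ∈ "aeiou".toList) : Int) := by
  induction l with
  | nil => simp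
  | cons h t ih =>
    simp only [List.count_cons, List.countP_cons]
    push_cast
    rw [show ∀ a b c d e a' b' c' d' e' : Int,
          (a + a') + (b + b') + (c + c') + (d + d') + (e + e')
          = (a + b + c + d + e) + (a' + b' + c' + d' + e') from by intros; ring]
    rw [ih]
    congr 1
    have := pv_indicator h
    simp only [beq_iff_eq] at *
    split_ifs at * <;> simp_all

-- ===== VERDICT =====
theorem countVAndC_spec : Claim_equal_countVAndC := by
  intro s _
  show countVAndC s = countVAndC_alt s
  unfold countVAndC countVAndC_alt
  simp only []
  rw [pv_pair_fold]
  simp only [zero_add]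
  -- evaluate B's five-lookup sum via the histogram lemma
  have hfold : "aeiou".toList.foldl
      (fun acc v => acc +
        (s.toList.foldl (fun d letter => d.insert letter (d.getD letter 0 + 1)) PySem.Dict.empty).getD v 0) 0
      = (s.toList.countP (· ∈ "aeiou".toList) : Int) := by
    have hg : ∀ v, (s.toList.foldl (fun d letter => d.insert letter (d.getD letter 0 + 1))
        PySem.Dict.empty).getD v 0 = (s.toList.count v : Int) := by
      intro v
      rw [PySem.Dict.getD_foldl_insert_add_one]
      simp [PySem.Dict.empty, PySem.Dict.getD, PySem.Dict.get?]
    show List.foldl _ 0 ['a','e','i','o','u'] = _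
    simp only [List.foldl_cons, List.foldl_nil, hg, zero_add]
    rw [← pv_count_sum s.toList]
  rw [hfold]
  have hv : (0:Int) ≤ (s.toList.countP (· ∈ "aeiou".toList) : Int) := by positivity
  have hl : (s.toList.countP (· ∈ "aeiou".toList) : Int) ≤ (s.toList.length : Int) := by
    exact_mod_cast List.countP_le_length ..
  set v := (s.toList.countP (· ∈ "aeiou".toList) : Int) with hvdef
  set n := (s.toList.length : Int) with hndef
  by_cases h1 : 2 * v > n
  · rw [if_pos (by omega : v > n - v), if_pos h1]
  · rw [if_neg (by omega : ¬ v > n - v), if_neg h1]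
    by_cases h2 : 2 * v < n
    · rw [if_pos (by omega : n - v > v), if_pos h2]
    · rw [if_neg (by omega : ¬ n - v > v), if_neg h2]
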